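-- pv_equiv track=rewrite | github.com/crypto-team228/projekt-krypto-2025 | scripts/anf_optimised_generator.py | compute_mask_closure
-- ===== SOURCE A (Python) =====
-- def compute_mask_closure(anf_bits):
--     """Domknięcie po podmaskach dla wszystkich masek z ANF."""
--     closure = set()
--     for masks in anf_bits:
--         for m in masks:
--             closure.add(m)
--             sub = m
--             while sub:
--                 sub = (sub - 1) & m
--                 if sub:
--                     closure.add(sub)
--     return closure
-- ===== SOURCE B (Python) =====
-- def compute_mask_closure(anf_bits):
--     """Domkniecie po podmaskach: each mask is expanded by recursively splitting
--     on its highest set bit, producing its submasks in decreasing order."""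
--     def desc_submasks(m):
--         # all submasks of m, in decreasing numeric order
--         if m == 0:
--             return [0]
--         h = 1 << (m.bit_length() - 1)
--         rest = desc_submasks(m - h)
--         return [h + s for s in rest] + rest
--     closure = set()
--     for masks in anf_bits:
--         for m in masks:
--             if m == 0:
--                 closure.add(0)
--             else:
--                 for s in desc_submasks(m):
--                     if s:
--                         closure.add(s)
--     return closure
-- ===== Notes on version B (the rewrite author's own statement) =====
-- stated objective: alternative
-- what changed: Replaces the per-mask (sub-1)&m while-loop enumeration with a recursive lattice decomposition: each mask's submask list is built by splitting on the highest set bit (dec(m) = [h+s for s in dec(m-h)] + dec(m-h)), which yields the same submasks in the same decreasing order.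
import Mathlib
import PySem

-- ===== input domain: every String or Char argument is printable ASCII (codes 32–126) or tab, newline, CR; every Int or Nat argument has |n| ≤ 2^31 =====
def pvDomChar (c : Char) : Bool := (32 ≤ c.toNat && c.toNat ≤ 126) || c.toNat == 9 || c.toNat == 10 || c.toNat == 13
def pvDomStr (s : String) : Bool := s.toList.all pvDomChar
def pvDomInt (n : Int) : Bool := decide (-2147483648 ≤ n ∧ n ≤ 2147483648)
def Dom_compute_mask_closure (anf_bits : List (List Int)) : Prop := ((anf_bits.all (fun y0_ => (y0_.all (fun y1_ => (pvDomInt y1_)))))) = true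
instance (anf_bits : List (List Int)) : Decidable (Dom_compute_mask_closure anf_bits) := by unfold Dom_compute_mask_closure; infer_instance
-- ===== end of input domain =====

-- B replaces A's per-mask (sub-1)&m while-loop by a recursive highest-bit lattice
-- decomposition producing the same submasks in the same decreasing order (objective:
-- alternative; same asymptotic cost).

-- ===== PORT A =====
-- Inner while-loop `sub = (sub-1) & m; if sub: closure.add(sub)` of A.
-- Python's `while sub:` never terminates when a mask is negative (excluded by Pre_);
-- the `0 < sub` guard and the nested `.toNat` comparison are totality guards only:
-- for 0 ≤ m and 0 < sub they always hold and the computation is exactly Python's.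
def pvLoopA (m : Int) (sub : Int) (acc : PySem.Set Int) : PySem.Set Int :=
  if 0 < sub then
    if PySem.Int.band (sub - 1) m ≠ 0 then
      if h : (PySem.Int.band (sub - 1) m).toNat < sub.toNat then
        pvLoopA m (PySem.Int.band (sub - 1) m)
          (PySem.Set.add acc (PySem.Int.band (sub - 1) m))
      else PySem.Set.add acc (PySem.Int.band (sub - 1) m)  -- unreachable for 0 ≤ m
    else acc
  else acc
termination_by sub.toNat
decreasing_by exact h

def compute_mask_closure (anf_bits : List (List Int)) : List Int :=
  anf_bits.foldl (fun closure masks =>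
    masks.foldl (fun closure m => pvLoopA m m (PySem.Set.add closure m)) closure)
    PySem.Set.empty

-- ===== PORT B =====
-- desc_submasks from Source B: split on the highest set bit h = 1 << (m.bit_length()-1).
-- Python's recursion never terminates for m < 0 (excluded by Pre_): the `0 < m` guard
-- (Python tests m == 0) is a totality guard collapsing that case to the base case.
def pvDesc (m : Int) : List Int :=
  if _hm : 0 < m then
    (pvDesc (m - (1 : Int) <<< (PySem.Int.bitLength m - 1))).map
        (fun s => (1 : Int) <<< (PySem.Int.bitLength m - 1) + s)
      ++ pvDesc (m - (1 : Int) <<< (PySem.Int.bitLength m - 1))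
  else [0]
termination_by m.toNat
decreasing_by
  all_goals
    have h2 : (1 : Int) <<< (PySem.Int.bitLength m - 1)
        = ((2 ^ (PySem.Int.bitLength m - 1) : Nat) : Int) := by
      rw [Int.shiftLeft_eq, one_mul]; push_cast; ring
    have h3 : 0 < 2 ^ (PySem.Int.bitLength m - 1) := by positivity
    rw [h2]; omega

def compute_mask_closure_alt (anf_bits : List (List Int)) : List Int :=
  anf_bits.foldl (fun closure masks =>
    masks.foldl (fun closure m =>
      if m = 0 then PySem.Set.add closure 0
      else (pvDesc m).foldl
          (fun c s => if s ≠ 0 then PySem.Set.add c s else c) closure)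
      closure)
    PySem.Set.empty

-- ===== PRECONDITION & SPEC =====
-- Pre_ excludes any negative mask: on a negative mask A's `while sub:` loop (and B's
-- recursion) never terminates, so A returns on exactly the inputs admitted here.
def Pre_compute_mask_closure (anf_bits : List (List Int)) : Prop :=
  ∀ masks ∈ anf_bits, ∀ m ∈ masks, 0 ≤ m
instance (anf_bits : List (List Int)) : Decidable (Pre_compute_mask_closure anf_bits) := by
  unfold Pre_compute_mask_closure; infer_instance

def pvWitness_compute_mask_closure : List (List Int) := [[3, 5], [0]]

def Spec_compute_mask_closure (anf_bits : List (List Int)) (out : List Int) : Prop := out = compute_mask_closure_alt anf_bits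
instance (anf_bits : List (List Int)) (out : List Int) : Decidable (Spec_compute_mask_closure anf_bits out) := by unfold Spec_compute_mask_closure; infer_instance

-- ===== CLAIM (what is proved, stated in full; the proofs are below) =====
def Claim_equal_compute_mask_closure : Prop := ∀ (anf_bits : List (List Int)), Dom_compute_mask_closure anf_bits → Pre_compute_mask_closure anf_bits → Spec_compute_mask_closure anf_bits (compute_mask_closure anf_bits)

-- ===== LEMMAS AND PROOFS =====

-- Nat model of A's inner loop: the list of successive values of `sub`.
def pvIterN (m sub : Nat) : List Nat :=
  if h : 0 < sub then ((sub - 1) &&& m) :: pvIterN m ((sub - 1) &&& m) else []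
termination_by sub
decreasing_by have : (sub - 1) &&& m ≤ sub - 1 := Nat.and_le_left; omega

-- Nat model of B's desc_submasks.
def pvDecN (m : Nat) : List Nat :=
  if hm : 0 < m then
    (pvDecN (m - 2 ^ (m.size - 1))).map (fun s => 2 ^ (m.size - 1) + s)
      ++ pvDecN (m - 2 ^ (m.size - 1))
  else [0]
termination_by m
decreasing_by
  all_goals
    have h1 : 2 ^ (m.size - 1) ≤ m := Nat.lt_size.mp (by have := Nat.size_pos.mpr hm; omega)
    have h2 : 0 < 2 ^ (m.size - 1) := by positivity
    omega

-- testBit of 2^K + x for x < 2^K.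
theorem pvTestBit_pow_add (K x i : Nat) (hx : x < 2 ^ K) :
    (2 ^ K + x).testBit i = (decide (i = K) || x.testBit i) := by
  rcases lt_trichotomy i K with h | h | h
  · rw [Nat.testBit_two_pow_add_gt h]
    simp [Nat.ne_of_lt h]
  · subst h
    rw [Nat.testBit_two_pow_add_eq, Nat.testBit_lt_two_pow hx]
    simp
  · have hlt : 2 ^ K + x < 2 ^ i := by
      calc 2 ^ K + x < 2 ^ K + 2 ^ K := by omega
        _ = 2 ^ (K + 1) := by ring
        _ ≤ 2 ^ i := Nat.pow_le_pow_right (by norm_num) h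
    rw [Nat.testBit_lt_two_pow hlt, Nat.testBit_lt_two_pow (by omega : x < 2 ^ i)]
    simp [Nat.ne_of_gt h]

theorem pvB2 (K r : Nat) (hr : r < 2 ^ K) : (2 ^ K - 1) &&& (2 ^ K + r) = r := by
  apply Nat.eq_of_testBit_eq
  intro i
  rw [Nat.testBit_land, Nat.testBit_two_pow_sub_one, pvTestBit_pow_add K r i hr]
  rcases Nat.lt_or_ge i K with h | h
  · simp [h, Nat.ne_of_lt h]
  · have hri : r.testBit i = false :=
      Nat.testBit_lt_two_pow (lt_of_lt_of_le hr (Nat.pow_le_pow_right (by norm_num) h))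
    simp [hri, Nat.not_lt.mpr h]

theorem pvB3 (K r t : Nat) (hr : r < 2 ^ K) (ht : t &&& r = t) (hpos : 0 < t) :
    (t - 1) &&& (2 ^ K + r) = (t - 1) &&& r := by
  have htr : t ≤ r := ht ▸ Nat.and_le_right
  apply Nat.eq_of_testBit_eq
  intro i
  rw [Nat.testBit_land, Nat.testBit_land, pvTestBit_pow_add K r i hr]
  rcases Nat.lt_or_ge i K with h | h
  · simp [Nat.ne_of_lt h]
  · have h1 : (t - 1).testBit i = false :=
      Nat.testBit_lt_two_pow
        (lt_of_lt_of_le (by omega) (Nat.pow_le_pow_right (by norm_num) h))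
    simp [h1]

theorem pvB1 (K r t : Nat) (hr : r < 2 ^ K) (ht : t &&& r = t) (hpos : 0 < t) :
    (2 ^ K + t - 1) &&& (2 ^ K + r) = 2 ^ K + ((t - 1) &&& r) := by
  have htr : t ≤ r := ht ▸ Nat.and_le_right
  have h4 : 2 ^ K + t - 1 = 2 ^ K + (t - 1) := by omega
  have hu : (t - 1) &&& r ≤ t - 1 := Nat.and_le_left
  apply Nat.eq_of_testBit_eq
  intro i
  rw [h4, Nat.testBit_land, pvTestBit_pow_add K (t - 1) i (by omega),
    pvTestBit_pow_add K r i hr, pvTestBit_pow_add K ((t - 1) &&& r) i (by omega),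
    Nat.testBit_land]
  by_cases hik : i = K
  · simp [hik]
  · simp [hik]

theorem pvM1 (K r : Nat) (hr : r < 2 ^ K) :
    ∀ t, t &&& r = t → pvIterN (2 ^ K + r) t = pvIterN r t := by
  intro t
  induction t using Nat.strong_induction_on with
  | _ t ih =>
    intro ht
    by_cases hpos : 0 < t
    · rw [pvIterN]
      conv_rhs => rw [pvIterN]
      simp only [dif_pos hpos]
      rw [pvB3 K r t hr ht hpos]
      congr 1
      exact ih ((t - 1) &&& r)
        (by have : (t - 1) &&& r ≤ t - 1 := Nat.and_le_left; omega)
        (by rw [Nat.land_assoc, Nat.and_self])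
    · have ht0 : t = 0 := by omega
      subst ht0
      simp [pvIterN]

theorem pvM2 (K r : Nat) (hr : r < 2 ^ K) :
    ∀ t, t &&& r = t →
      pvIterN (2 ^ K + r) (2 ^ K + t)
        = (pvIterN r t).map (fun u => 2 ^ K + u) ++ (r :: pvIterN r r) := by
  intro t
  induction t using Nat.strong_induction_on with
  | _ t ih =>
    intro ht
    have hKpos : 0 < 2 ^ K := by positivity
    by_cases hpos : 0 < t
    · have htr : t ≤ r := ht ▸ Nat.and_le_right
      have hu : (t - 1) &&& r ≤ t - 1 := Nat.and_le_left
      rw [pvIterN]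
      simp only [dif_pos (by omega : 0 < 2 ^ K + t)]
      rw [pvB1 K r t hr ht hpos]
      conv_rhs => rw [pvIterN]
      simp only [dif_pos hpos, List.map_cons, List.cons_append]
      congr 1
      exact ih ((t - 1) &&& r) (by omega) (by rw [Nat.land_assoc, Nat.and_self])
    · have ht0 : t = 0 := by omega
      subst ht0
      rw [show 2 ^ K + 0 = 2 ^ K by omega, pvIterN]
      simp only [dif_pos hKpos]
      rw [pvB2 K r hr, pvM1 K r hr r (Nat.and_self r)]
      conv_rhs => rw [pvIterN]
      simp

theorem pvM3 (n : Nat) : pvDecN n = n :: pvIterN n n := by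
  induction n using Nat.strong_induction_on with
  | _ n ih =>
    by_cases hpos : 0 < n
    · have hK : 2 ^ (n.size - 1) ≤ n :=
        Nat.lt_size.mp (by have := Nat.size_pos.mpr hpos; omega)
      have hlt : n < 2 ^ n.size := Nat.lt_size_self n
      have hsz : n.size = (n.size - 1) + 1 := by have := Nat.size_pos.mpr hpos; omega
      have hr : n - 2 ^ (n.size - 1) < 2 ^ (n.size - 1) := by
        rw [hsz] at hlt
        have h2 : 2 ^ ((n.size - 1) + 1) = 2 ^ (n.size - 1) + 2 ^ (n.size - 1) := by ring
        omega
      have hKpos : 0 < 2 ^ (n.size - 1) := by positivity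
      rw [pvDecN]
      simp only [dif_pos hpos]
      rw [ih (n - 2 ^ (n.size - 1)) (by omega), List.map_cons, List.cons_append,
        ← pvM2 (n.size - 1) (n - 2 ^ (n.size - 1)) hr (n - 2 ^ (n.size - 1))
          (Nat.and_self _),
        show 2 ^ (n.size - 1) + (n - 2 ^ (n.size - 1)) = n by omega]
    · have hn0 : n = 0 := by omega
      subst hn0
      rw [pvDecN, pvIterN]
      simp

theorem pvLoopA_eq (n : Nat) : ∀ (s : Nat) (acc : PySem.Set Int),
    pvLoopA (n : Int) (s : Int) acc
      = (pvIterN n s).foldl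
          (fun c (t : Nat) => if (t : Int) ≠ 0 then PySem.Set.add c (t : Int) else c) acc := by
  intro s
  induction s using Nat.strong_induction_on with
  | _ s ih =>
    intro acc
    by_cases hpos : 0 < s
    · have hc : (0 : Int) < (s : Int) := by exact_mod_cast hpos
      have hcast : ((s : Int) - 1) = (((s - 1 : Nat)) : Int) := by omega
      rw [pvLoopA, if_pos hc, hcast, PySem.Int.band_natCast]
      conv_rhs => rw [pvIterN]
      simp only [dif_pos hpos]
      by_cases hu : (s - 1) &&& n = 0
      · rw [hu]
        simp [pvIterN]
      · have hule : (s - 1) &&& n ≤ s - 1 := Nat.and_le_left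
        have hne : (((s - 1) &&& n : Nat) : Int) ≠ 0 := by exact_mod_cast hu
        rw [if_pos hne, dif_pos (by simp; omega)]
        rw [List.foldl_cons, if_pos hne]
        exact ih ((s - 1) &&& n) (by omega) _
    · have hs0 : s = 0 := by omega
      subst hs0
      rw [pvLoopA]
      simp [pvIterN]

theorem pvBitLen_eq_size (n : Nat) (h : 0 < n) :
    PySem.Int.bitLength (n : Int) = n.size := by
  apply le_antisymm
  · have h1 := PySem.Int.two_pow_bitLength_le (n : Int) (by exact_mod_cast h.ne')
    rw [Int.natAbs_natCast] at h1
    have h2 := Nat.lt_size.mpr h1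
    omega
  · have h2 := PySem.Int.lt_two_pow_bitLength (n : Int)
    rw [Int.natAbs_natCast] at h2
    exact Nat.size_le.mpr h2

theorem pvDesc_eq (n : Nat) :
    pvDesc (n : Int) = (pvDecN n).map (fun t : Nat => (t : Int)) := by
  induction n using Nat.strong_induction_on with
  | _ n ih =>
    by_cases hpos : 0 < n
    · have hc : (0 : Int) < (n : Int) := by exact_mod_cast hpos
      have hK : 2 ^ (n.size - 1) ≤ n :=
        Nat.lt_size.mp (by have := Nat.size_pos.mpr hpos; omega)
      have hKpos : 0 < 2 ^ (n.size - 1) := by positivity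
      have hsh : (1 : Int) <<< (PySem.Int.bitLength (n : Int) - 1)
          = ((2 ^ (n.size - 1) : Nat) : Int) := by
        rw [pvBitLen_eq_size n hpos, Int.shiftLeft_eq, one_mul]
        push_cast
        ring
      have hsub : (n : Int) - ((2 ^ (n.size - 1) : Nat) : Int)
          = ((n - 2 ^ (n.size - 1) : Nat) : Int) := by omega
      rw [pvDesc, dif_pos hc, hsh, hsub, ih (n - 2 ^ (n.size - 1)) (by omega)]
      conv_rhs => rw [pvDecN]
      simp only [dif_pos hpos, List.map_append, List.map_map, Function.comp_def]
      push_cast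
      rfl
    · have hn0 : n = 0 := by omega
      subst hn0
      rw [pvDesc, pvDecN]
      norm_num

theorem pvMask_eq (m : Int) (hm : 0 ≤ m) (acc : PySem.Set Int) :
    pvLoopA m m (PySem.Set.add acc m)
      = (if m = 0 then PySem.Set.add acc 0
         else (pvDesc m).foldl
            (fun c s => if s ≠ 0 then PySem.Set.add c s else c) acc) := by
  obtain ⟨n, rfl⟩ := Int.eq_ofNat_of_zero_le hm
  by_cases hn : n = 0
  · subst hn
    rw [pvLoopA]
    norm_num
  · have hne : ((n : Nat) : Int) ≠ 0 := by exact_mod_cast hn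
    rw [if_neg hne, pvDesc_eq n, pvM3 n, List.map_cons, List.foldl_cons,
      if_pos hne, List.foldl_map, pvLoopA_eq n n (PySem.Set.add acc (n : Int))]

theorem pvInner (masks : List Int) (h : ∀ m ∈ masks, 0 ≤ m) (acc : PySem.Set Int) :
    masks.foldl (fun closure m => pvLoopA m m (PySem.Set.add closure m)) acc
      = masks.foldl (fun closure m =>
          if m = 0 then PySem.Set.add closure 0
          else (pvDesc m).foldl
              (fun c s => if s ≠ 0 then PySem.Set.add c s else c) closure) acc := by
  induction masks generalizing acc with
  | nil => rfl
  | cons m ms ih =>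
    simp only [List.foldl_cons]
    rw [pvMask_eq m (h m List.mem_cons_self) acc]
    exact ih (fun x hx => h x (List.mem_cons_of_mem _ hx)) _

theorem pvOuter (l : List (List Int)) (h : ∀ masks ∈ l, ∀ m ∈ masks, 0 ≤ m)
    (acc : PySem.Set Int) :
    l.foldl (fun closure masks =>
        masks.foldl (fun closure m => pvLoopA m m (PySem.Set.add closure m)) closure) acc
      = l.foldl (fun closure masks =>
          masks.foldl (fun closure m =>
            if m = 0 then PySem.Set.add closure 0
            else (pvDesc m).foldl
                (fun c s => if s ≠ 0 then PySem.Set.add c s else c) closure) closure) acc := by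
  induction l generalizing acc with
  | nil => rfl
  | cons masks rest ih =>
    simp only [List.foldl_cons]
    rw [pvInner masks (h masks List.mem_cons_self) acc]
    exact ih (fun x hx => h x (List.mem_cons_of_mem _ hx)) _

-- ===== VERDICT (by name: the statement is the Claim_ definition above) =====
theorem compute_mask_closure_spec : Claim_equal_compute_mask_closure := by
  intro anf_bits _ hpre
  unfold Spec_compute_mask_closure compute_mask_closure compute_mask_closure_alt
  exact pvOuter anf_bits hpre _
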